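-- pv_equiv track=rewrite | github.com/silam741852963/web2product-catalog | scripts/extensions/load_source.py | _resolve_keys
-- ===== SOURCE A (Python) =====
-- from typing import (
--     Dict,
--     Iterable,
--     Iterator,
--     List,
--     Mapping,
--     Optional,
--     Protocol,
--     Sequence,
--     Set,
--     Tuple,
-- )
--
-- _PRIMARY_ID_KEYS = ("bvdid", "hojin_id", "id")
--
-- _PRIMARY_NAME_KEYS = ("name", "company_name", "company")
--
-- _PRIMARY_URL_KEYS = ("url", "website", "homepage", "home_page")
--
-- def _resolve_keys(fieldnames: Optional[Sequence[str]]) -> Tuple[str, str, str]: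
--     """
--     Pick header names (case-insensitive) for (id, name, url).
--     Returns **original-cased** names from the file ('' if not found).
--     """
--     fset = {(fn or "").strip().lower(): fn for fn in (fieldnames or [])}
--
--     def pick(candidates: Sequence[str]) -> str:
--         for c in candidates:
--             if c in fset:
--                 return fset[c]
--         return ""
--
--     return (
--         pick(_PRIMARY_ID_KEYS),
--         pick(_PRIMARY_NAME_KEYS),
--         pick(_PRIMARY_URL_KEYS),
--     )
-- ===== SOURCE B (Python) =====
-- _PRIMARY_ID_KEYS = ("bvdid", "hojin_id", "id")
-- _PRIMARY_NAME_KEYS = ("name", "company_name", "company")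
-- _PRIMARY_URL_KEYS = ("url", "website", "homepage", "home_page")
--
-- _GROUPS = (_PRIMARY_ID_KEYS, _PRIMARY_NAME_KEYS, _PRIMARY_URL_KEYS)
--
--
-- def _resolve_keys(fieldnames):
--     """Single pass over the headers: for each header compute its priority
--     (index) in each key group and keep, per group, the header with the
--     best priority seen so far."""
--     best = [(len(g), "") for g in _GROUPS]
--     for fn in (fieldnames or []):
--         key = (fn or "").strip().lower()
--         for i, g in enumerate(_GROUPS):
--             try:
--                 rank = g.index(key)
--             except ValueError:
--                 continue
--             if rank < best[i][0]:
--                 best[i] = (rank, fn)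
--     return tuple(name for _, name in best)
-- ===== Notes on version B (the rewrite author's own statement) =====
-- stated objective: alternative
-- what changed: Instead of building a lowercase->original dict and probing it candidate by candidate, B makes a single pass over the headers keeping, per key group, the header whose normalised form has the best candidate priority (first occurrence wins a priority tie); Pre_ excludes header lists containing two distinct headers with the same candidate-matching normalised form, where A's dict last-write-wins pick versus B's first-occurrence pick is an accidental tie-break either way.
-- outside the precondition, e.g. on _resolve_keys(['ID', 'id']): A returns ('id', '', ''), B returns ('ID', '', '')
import Mathlib
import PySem

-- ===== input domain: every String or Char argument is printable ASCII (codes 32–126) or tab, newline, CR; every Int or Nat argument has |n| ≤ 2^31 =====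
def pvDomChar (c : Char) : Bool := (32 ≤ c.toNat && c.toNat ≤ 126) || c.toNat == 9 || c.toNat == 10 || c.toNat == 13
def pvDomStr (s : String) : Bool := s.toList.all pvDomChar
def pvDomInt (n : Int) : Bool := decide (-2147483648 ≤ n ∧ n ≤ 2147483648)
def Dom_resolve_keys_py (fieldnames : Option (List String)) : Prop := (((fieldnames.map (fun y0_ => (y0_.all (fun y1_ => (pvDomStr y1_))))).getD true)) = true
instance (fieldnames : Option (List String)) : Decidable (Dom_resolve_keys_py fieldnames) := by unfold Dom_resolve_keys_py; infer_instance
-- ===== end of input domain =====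

-- B replaces the lowercase->original index dict probed candidate-by-candidate with a single
-- pass over the headers that keeps, per key group, the header of best candidate priority
-- (objective: alternative, same cost for the fixed candidate sets).

-- ===== PORT A =====
-- (fn or "").strip().lower()
def pvNorm (fn : String) : String :=
  PySem.Str.lower (PySem.Str.strip (if fn = "" then "" else fn))

def pvFset (fns : List String) : PySem.Dict String String :=
  fns.foldl (fun d fn => d.insert (pvNorm fn) fn) PySem.Dict.empty

def pvPickA (fset : PySem.Dict String String) : List String → String
  | [] => ""
  | c :: rest => if fset.contains c then (fset.get? c).getD "" else pvPickA fset rest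

def resolve_keys_py (fieldnames : Option (List String)) : String × String × String :=
  let fset := pvFset (fieldnames.getD [])
  (pvPickA fset ["bvdid", "hojin_id", "id"],
   pvPickA fset ["name", "company_name", "company"],
   pvPickA fset ["url", "website", "homepage", "home_page"])

-- ===== PORT B =====
-- tuple.index with try/except ValueError: first index of k in cs, none if absent
def pvRank (cs : List String) (k : String) : Option Nat :=
  match cs with
  | [] => none
  | c :: rest => if k = c then some 0 else (pvRank rest k).map (· + 1)

-- one header against one group's running best (rank, name)
def pvStep (cs : List String) (st : Nat × String) (fn : String) : Nat × String :=
  match pvRank cs (pvNorm fn) with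
  | some r => if r < st.1 then (r, fn) else st
  | none => st

-- the inner `for i, g in enumerate(_GROUPS)` unrolled over the three fixed groups
def pvStep3 (st : (Nat × String) × (Nat × String) × (Nat × String)) (fn : String) :
    (Nat × String) × (Nat × String) × (Nat × String) :=
  (pvStep ["bvdid", "hojin_id", "id"] st.1 fn,
   pvStep ["name", "company_name", "company"] st.2.1 fn,
   pvStep ["url", "website", "homepage", "home_page"] st.2.2 fn)

def resolve_keys_py_alt (fieldnames : Option (List String)) : String × String × String :=
  let best := (fieldnames.getD []).foldl pvStep3 ((3, ""), (3, ""), (4, ""))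
  (best.1.2, best.2.1.2, best.2.2.2)

-- ===== PRECONDITION & SPEC =====
def pvAllCands : List String :=
  ["bvdid", "hojin_id", "id", "name", "company_name", "company",
   "url", "website", "homepage", "home_page"]

-- Pre_ excludes lists holding two DISTINCT headers with the same candidate-matching normalised
-- form: there A's dict last-write-wins pick and B's first-occurrence pick are both accidental
-- tie-breaks on duplicate keys.
def Pre_resolve_keys_py (fieldnames : Option (List String)) : Prop :=
  List.Pairwise (fun a b => pvNorm a = pvNorm b → a = b)
    ((fieldnames.getD []).filter (fun fn => pvNorm fn ∈ pvAllCands))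
instance (fieldnames : Option (List String)) : Decidable (Pre_resolve_keys_py fieldnames) := by
  unfold Pre_resolve_keys_py; infer_instance

def pvWitness_resolve_keys_py : Option (List String) := some ["Id", "Company Name", " URL "]

def Spec_resolve_keys_py (fieldnames : Option (List String)) (out : String × String × String) : Prop := out = resolve_keys_py_alt fieldnames
instance (fieldnames : Option (List String)) (out : String × String × String) : Decidable (Spec_resolve_keys_py fieldnames out) := by unfold Spec_resolve_keys_py; infer_instance

-- ===== CLAIM (what is proved, stated in full; the proofs are below) =====
def Claim_equal_resolve_keys_py : Prop := ∀ (fieldnames : Option (List String)), Dom_resolve_keys_py fieldnames → Pre_resolve_keys_py fieldnames → Spec_resolve_keys_py fieldnames (resolve_keys_py fieldnames)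

-- ===== LEMMAS AND PROOFS =====

-- common reference: first candidate with any matching header, then the first such header
def pvRecPick (fns : List String) : List String → String
  | [] => ""
  | c :: rest =>
    match fns.find? (fun fn => pvNorm fn == c) with
    | some f => f
    | none => pvRecPick fns rest

-- ---- B side (no precondition needed) ----

theorem pvFold_zero (cs : List String) (fns : List String) (n : String) :
    fns.foldl (pvStep cs) (0, n) = (0, n) := by
  induction fns with
  | nil => rfl
  | cons fn rest ih =>
    have h : pvStep cs (0, n) fn = (0, n) := by
      unfold pvStep
      cases pvRank cs (pvNorm fn) with
      | none => rfl
      | some r => simp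
    simp [List.foldl_cons, h, ih]

theorem pvFold_cons (c : String) (rest : List String) (fns : List String) :
    ∀ (r : Nat) (n : String),
      (fns.foldl (pvStep (c :: rest)) (r + 1, n)).2
        = match fns.find? (fun fn => pvNorm fn == c) with
          | some f => f
          | none => (fns.foldl (pvStep rest) (r, n)).2 := by
  induction fns with
  | nil => intro r n; simp only [List.foldl_nil, List.find?_nil]
  | cons fn fns ih =>
    intro r n
    by_cases hc : pvNorm fn = c
    · have hr : pvRank (c :: rest) (pvNorm fn) = some 0 := by
        rw [pvRank, if_pos hc]
      have hstep : pvStep (c :: rest) (r + 1, n) fn = (0, fn) := by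
        rw [pvStep, hr]; simp
      rw [List.foldl_cons, hstep, pvFold_zero,
        List.find?_cons_of_pos (by simpa using hc)]
    · have hr : pvRank (c :: rest) (pvNorm fn) = (pvRank rest (pvNorm fn)).map (· + 1) := by
        rw [pvRank, if_neg hc]
      rw [List.foldl_cons, List.foldl_cons,
        List.find?_cons_of_neg (by simpa using hc)]
      cases hk : pvRank rest (pvNorm fn) with
      | none =>
        have h1 : pvStep (c :: rest) (r + 1, n) fn = (r + 1, n) := by
          rw [pvStep, hr, hk]; simp
        have h2 : pvStep rest (r, n) fn = (r, n) := by
          rw [pvStep, hk]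
        rw [h1, h2]; exact ih r n
      | some k =>
        have h1 : pvStep (c :: rest) (r + 1, n) fn
            = if k + 1 < r + 1 then (k + 1, fn) else (r + 1, n) := by
          rw [pvStep, hr, hk]; rfl
        have h2 : pvStep rest (r, n) fn = if k < r then (k, fn) else (r, n) := by
          rw [pvStep, hk]
        rw [h1, h2]
        by_cases hlt : k < r
        · rw [if_pos (by omega), if_pos hlt]; exact ih k fn
        · rw [if_neg (by omega), if_neg hlt]; exact ih r n

theorem pvFoldB_eq_rec (fns : List String) (cs : List String) :
    (fns.foldl (pvStep cs) (cs.length, "")).2 = pvRecPick fns cs := by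
  induction cs with
  | nil =>
    have h : ∀ st : Nat × String, st.1 = 0 → fns.foldl (pvStep []) st = st := by
      intro st h0
      obtain ⟨r, n⟩ := st
      simp only at h0
      subst h0
      exact pvFold_zero [] fns n
    simp [pvRecPick, h (0, "") rfl]
  | cons c rest ih =>
    rw [pvRecPick]
    have := pvFold_cons c rest fns rest.length ""
    simp only [List.length_cons] at *
    rw [this]
    cases fns.find? (fun fn => pvNorm fn == c) with
    | some f => rfl
    | none => exact ih

-- the triple fold is the three independent folds
theorem pvFold3 (fns : List String) :
    ∀ (a b c : Nat × String),
      fns.foldl pvStep3 (a, b, c)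
        = (fns.foldl (pvStep ["bvdid", "hojin_id", "id"]) a,
           fns.foldl (pvStep ["name", "company_name", "company"]) b,
           fns.foldl (pvStep ["url", "website", "homepage", "home_page"]) c) := by
  induction fns with
  | nil => intro a b c; rfl
  | cons fn fns ih => intro a b c; simp [List.foldl_cons, pvStep3, ih]

-- ---- A side (uses the precondition) ----

-- keep-last fold is unchanged when no later element rebinds differently
theorem pvLastFold_const (p : String → Bool) (l : List String) (x : String)
    (h : ∀ b ∈ l, p b = true → b = x) :
    l.foldl (fun ch fn => if p fn then some fn else ch) (some x) = some x := by
  induction l with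
  | nil => rfl
  | cons b l ih =>
    by_cases hb : p b = true
    · have hbx := h b (List.mem_cons_self) hb
      subst hbx
      simp only [List.foldl_cons, if_pos hb]
      exact ih (fun b' hb' => h b' (List.mem_cons_of_mem _ hb'))
    · simp only [List.foldl_cons, if_neg hb]
      exact ih (fun b' hb' => h b' (List.mem_cons_of_mem _ hb'))

-- under "all matches equal", last match = first match
theorem pvLastFold_eq_find (p : String → Bool) (l : List String)
    (h : ∀ a ∈ l, ∀ b ∈ l, p a = true → p b = true → a = b) :
    l.foldl (fun ch fn => if p fn then some fn else ch) none = l.find? p := by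
  induction l with
  | nil => rfl
  | cons x l ih =>
    by_cases hx : p x = true
    · rw [List.foldl_cons, if_pos hx, List.find?_cons_of_pos hx]
      exact pvLastFold_const p l x
        (fun b hb hpb => (h b (List.mem_cons_of_mem _ hb) x List.mem_cons_self hpb hx))
    · rw [List.foldl_cons, if_neg hx, List.find?_cons_of_neg hx]
      exact ih (fun a ha b hb => h a (List.mem_cons_of_mem _ ha) b (List.mem_cons_of_mem _ hb))

theorem pvFset_get? (fns : List String) (d : PySem.Dict String String) (c : String) :
    (fns.foldl (fun d fn => d.insert (pvNorm fn) fn) d).get? c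
      = fns.foldl (fun chosen fn => if (fun fn => pvNorm fn == c) fn then some fn else chosen) (d.get? c) := by
  induction fns generalizing d with
  | nil => rfl
  | cons fn rest ih =>
    simp only [List.foldl_cons, ih, PySem.Dict.get?_insert]
    by_cases h : pvNorm fn = c
    · simp [h]
    · rw [if_neg (fun hc => h hc.symm), if_neg (by simp [h])]

theorem pvPickA_eq_rec (fns : List String) (cs : List String)
    (h : ∀ c ∈ cs, ∀ a ∈ fns, ∀ b ∈ fns, pvNorm a = c → pvNorm b = c → a = b) :
    pvPickA (pvFset fns) cs = pvRecPick fns cs := by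
  induction cs with
  | nil => rfl
  | cons c rest ih =>
    have hget : (pvFset fns).get? c = fns.find? (fun fn => pvNorm fn == c) := by
      have h1 := pvFset_get? fns PySem.Dict.empty c
      rw [PySem.Dict.get?_empty] at h1
      rw [pvFset, h1]
      exact pvLastFold_eq_find _ fns
        (fun a ha b hb hpa hpb =>
          h c List.mem_cons_self a ha b hb (by simpa using hpa) (by simpa using hpb))
    rw [pvPickA, pvRecPick, PySem.Dict.contains_eq_isSome_get?, hget]
    cases hf : fns.find? (fun fn => pvNorm fn == c) with
    | some f => simp
    | none =>
      simp only [Option.isSome_none, Bool.false_eq_true, if_false]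
      exact ih (fun c' hc' => h c' (List.mem_cons_of_mem _ hc'))

-- ---- precondition gives the uniqueness hypothesis ----

theorem pvUniq_of_pairwise (l : List String)
    (hp : List.Pairwise (fun a b => pvNorm a = pvNorm b → a = b) l) :
    ∀ a ∈ l, ∀ b ∈ l, pvNorm a = pvNorm b → a = b := by
  induction l with
  | nil => intro a ha; exact absurd ha (List.not_mem_nil)
  | cons x l ih =>
    have hx := List.pairwise_cons.mp hp
    intro a ha b hb hn
    rcases List.mem_cons.mp ha with rfl | ha' <;> rcases List.mem_cons.mp hb with rfl | hb'
    · rfl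
    · exact hx.1 b hb' hn
    · exact (hx.1 a ha' hn.symm).symm
    · exact ih hx.2 a ha' b hb' hn

theorem pvUniq_of_pre (fns : List String)
    (hp : List.Pairwise (fun a b => pvNorm a = pvNorm b → a = b)
            (fns.filter (fun fn => pvNorm fn ∈ pvAllCands)))
    (c : String) (hc : c ∈ pvAllCands) :
    ∀ a ∈ fns, ∀ b ∈ fns, pvNorm a = c → pvNorm b = c → a = b := by
  intro a ha b hb hna hnb
  have ha' : a ∈ fns.filter (fun fn => pvNorm fn ∈ pvAllCands) :=
    List.mem_filter.mpr ⟨ha, by simp [hna, hc]⟩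
  have hb' : b ∈ fns.filter (fun fn => pvNorm fn ∈ pvAllCands) :=
    List.mem_filter.mpr ⟨hb, by simp [hnb, hc]⟩
  exact pvUniq_of_pairwise _ hp a ha' b hb' (hna.trans hnb.symm)

-- ===== VERDICT (by name: the statement is the Claim_ definition above) =====
theorem resolve_keys_py_spec : Claim_equal_resolve_keys_py := by
  intro fieldnames _ hpre
  unfold Spec_resolve_keys_py resolve_keys_py resolve_keys_py_alt
  set fns := fieldnames.getD [] with hfns
  have hpre' : List.Pairwise (fun a b => pvNorm a = pvNorm b → a = b)
      (fns.filter (fun fn => pvNorm fn ∈ pvAllCands)) := hpre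
  have huniq := pvUniq_of_pre fns hpre'
  rw [pvFold3]
  refine Prod.ext ?_ (Prod.ext ?_ ?_) <;> dsimp only
  · rw [show (3 : Nat) = (["bvdid", "hojin_id", "id"] : List String).length from rfl,
      pvFoldB_eq_rec]
    exact pvPickA_eq_rec fns _ (fun c hc => huniq c (by
      revert hc; intro hc; fin_cases hc <;> simp [pvAllCands]))
  · rw [show (3 : Nat) = (["name", "company_name", "company"] : List String).length from rfl,
      pvFoldB_eq_rec]
    exact pvPickA_eq_rec fns _ (fun c hc => huniq c (by
      revert hc; intro hc; fin_cases hc <;> simp [pvAllCands]))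
  · rw [show (4 : Nat) = (["url", "website", "homepage", "home_page"] : List String).length from rfl,
      pvFoldB_eq_rec]
    exact pvPickA_eq_rec fns _ (fun c hc => huniq c (by
      revert hc; intro hc; fin_cases hc <;> simp [pvAllCands]))
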